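-- pv_equiv track=rewrite | github.com/jinh0ng/Programming-WB-UT- | Quiz5D.py | firstPunctuationLocations
-- ===== SOURCE A (Python) =====
-- def firstPunctuationLocations(strings):
--     result = {}
--     for string in strings:
--         punctuation_index = -1
--         for index, char in enumerate(string):
--             if char in ('.', '?', '!'):
--                 punctuation_index = index
--                 break
--         result[string] = punctuation_index
--     return result
-- ===== SOURCE B (Python) =====
-- def firstPunctuationLocations(strings):
--     return {
--         s: min([i for i in (s.find('.'), s.find('?'), s.find('!')) if i != -1],
--                default=-1)
--         for s in strings
--     }
-- ===== Notes on version B (the rewrite author's own statement) =====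
-- stated objective: idiomatic
-- what changed: Replaces the hand-written enumerate-and-break scan per string with three str.find library scans (one per punctuation mark) combined by min with default -1, built as a dict comprehension.
import Mathlib
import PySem

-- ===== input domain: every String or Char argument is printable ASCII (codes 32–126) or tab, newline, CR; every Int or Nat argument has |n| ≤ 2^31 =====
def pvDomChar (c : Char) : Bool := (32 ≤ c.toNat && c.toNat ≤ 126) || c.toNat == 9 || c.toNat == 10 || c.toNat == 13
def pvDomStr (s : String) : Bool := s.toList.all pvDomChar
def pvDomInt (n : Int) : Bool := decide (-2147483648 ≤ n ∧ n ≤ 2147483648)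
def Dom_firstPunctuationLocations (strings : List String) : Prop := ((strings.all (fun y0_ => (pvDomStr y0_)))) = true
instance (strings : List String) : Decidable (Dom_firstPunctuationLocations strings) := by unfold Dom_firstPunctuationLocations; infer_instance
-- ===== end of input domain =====

-- B replaces A's single enumerate-and-break scan per string with three library `find`s
-- (one per punctuation mark) combined by a filtered min with default -1 (idiomatic; same cost).

-- ===== PORT A =====
-- inner loop: `for index, char in enumerate(string): if char in ('.','?','!'): …; break`
def pvALoop : List (Int × Char) → Int
  | [] => -1
  | (i, c) :: rest =>
      if c == '.' || c == '?' || c == '!' then i else pvALoop rest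

def firstPunctuationLocations (strings : List String) : List (String × Int) :=
  (strings.foldl
    (fun result string =>
      result.insert string (pvALoop (PySem.List.enumerate string.toList 0)))
    PySem.Dict.empty).items

-- ===== PORT B =====
-- min([i for i in (s.find('.'), s.find('?'), s.find('!')) if i != -1], default=-1)
def pvBVal (s : String) : Int :=
  let cands := [PySem.Str.find s ".", PySem.Str.find s "?", PySem.Str.find s "!"].filter
    (fun i => i != -1)
  match PySem.List.min? cands (fun x => x) with
  | some m => m
  | none => -1

def firstPunctuationLocations_alt (strings : List String) : List (String × Int) :=
  (strings.foldl (fun result s => result.insert s (pvBVal s)) PySem.Dict.empty).items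

-- ===== PRECONDITION & SPEC =====
def Spec_firstPunctuationLocations (strings : List String) (out : List (String × Int)) : Prop := out = firstPunctuationLocations_alt strings
instance (strings : List String) (out : List (String × Int)) : Decidable (Spec_firstPunctuationLocations strings out) := by unfold Spec_firstPunctuationLocations; infer_instance

-- ===== CLAIM (what is proved, stated in full; the proofs are below) =====
def Claim_equal_firstPunctuationLocations : Prop := ∀ (strings : List String), Dom_firstPunctuationLocations strings → Spec_firstPunctuationLocations strings (firstPunctuationLocations strings)

-- ===== LEMMAS AND PROOFS =====

-- structural first index of a single character (proof-only helper)
def pvFidx (c : Char) : List Char → Int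
  | [] => -1
  | h :: t => if h = c then 0 else (if pvFidx c t = -1 then -1 else pvFidx c t + 1)

-- structural first index of any of the three punctuation marks (proof-only helper)
def pvFidxP : List Char → Int
  | [] => -1
  | h :: t =>
      if h = '.' ∨ h = '?' ∨ h = '!' then 0
      else (if pvFidxP t = -1 then -1 else pvFidxP t + 1)

theorem pvFidx_cases (c : Char) (l : List Char) : pvFidx c l = -1 ∨ 0 ≤ pvFidx c l := by
  induction l with
  | nil => left; rfl
  | cons h t ih =>
      by_cases hc : h = c
      · right; simp [pvFidx, hc]
      · rcases ih with h1 | h1 <;> simp [pvFidx, hc, h1] <;> omega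

theorem pvFidxP_cases (l : List Char) : pvFidxP l = -1 ∨ 0 ≤ pvFidxP l := by
  induction l with
  | nil => left; rfl
  | cons h t ih =>
      by_cases hc : h = '.' ∨ h = '?' ∨ h = '!'
      · right; simp [pvFidxP, hc]
      · rcases ih with h1 | h1 <;> simp [pvFidxP, hc, h1] <;> omega

theorem pvFind_go_singleton (c : Char) (l : List Char) (k : Nat) :
    PySem.Chars.find.go [c] l k = if pvFidx c l = -1 then -1 else k + pvFidx c l := by
  induction l generalizing k with
  | nil => simp [PySem.Chars.find.go, pvFidx]
  | cons h t ih =>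
      by_cases hc : c = h
      · simp [PySem.Chars.find.go, List.isPrefixOf, hc, pvFidx]
      · have hne : h ≠ c := fun hh => hc hh.symm
        rw [show PySem.Chars.find.go [c] (h :: t) k
              = if [c].isPrefixOf (h :: t) then (k : Int) else PySem.Chars.find.go [c] t (k + 1) from rfl]
        simp only [List.isPrefixOf, List.isPrefixOf_nil_left, Bool.and_true, beq_iff_eq,
          if_neg hc]
        rw [ih]
        rcases pvFidx_cases c t with h1 | h1 <;>
          simp [pvFidx, hne, h1] <;> omega

theorem pvFind_singleton (c : Char) (l : List Char) :
    PySem.Chars.find l [c] = pvFidx c l := by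
  rw [show PySem.Chars.find l [c] = PySem.Chars.find.go [c] l 0 from rfl,
    pvFind_go_singleton]
  rcases pvFidx_cases c l with h1 | h1
  · simp [h1]
  · split_ifs with h2 <;> omega

theorem pvALoop_enumerate (l : List Char) (n : Int) :
    pvALoop (PySem.List.enumerate l n)
      = if pvFidxP l = -1 then -1 else n + pvFidxP l := by
  induction l generalizing n with
  | nil => simp [PySem.List.enumerate_nil, pvALoop, pvFidxP]
  | cons h t ih =>
      rw [PySem.List.enumerate_cons]
      by_cases hc : h = '.' ∨ h = '?' ∨ h = '!'
      · have hb : (h == '.' || h == '?' || h == '!') = true := by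
          rcases hc with h1 | h1 | h1 <;> simp [h1]
        simp [pvALoop, hb, pvFidxP, hc]
      · have hb : (h == '.' || h == '?' || h == '!') = false := by
          push_neg at hc
          simp [hc.1, hc.2.1, hc.2.2]
        rw [show pvALoop ((n, h) :: PySem.List.enumerate t (n + 1))
              = if (h == '.' || h == '?' || h == '!') then n else pvALoop (PySem.List.enumerate t (n + 1)) from rfl]
        rw [hb, ih]
        rcases pvFidxP_cases t with h1 | h1 <;> simp [pvFidxP, hc, h1] <;> omega

theorem pv_min?_nil : PySem.List.min? ([] : List Int) (fun x : Int => x) = none := by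
  simp [PySem.List.min?_eq_none_iff]

theorem pvCombine (a b c : Int) (ha : a = -1 ∨ 0 ≤ a) (hb : b = -1 ∨ 0 ≤ b)
    (hc : c = -1 ∨ 0 ≤ c) :
    (match PySem.List.min? (([a, b, c]).filter (fun i => i != -1)) (fun x => x) with
      | some m => m
      | none => -1)
      = if a ≠ -1 ∧ (b = -1 ∨ a ≤ b) ∧ (c = -1 ∨ a ≤ c) then a
        else if b ≠ -1 ∧ (c = -1 ∨ b ≤ c) then b
        else c := by
  rcases ha with ha | ha <;> rcases hb with hb | hb <;> rcases hc with hc | hc <;>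
    (try have ha' : a ≠ -1 := by omega) <;>
    (try have hb' : b ≠ -1 := by omega) <;>
    (try have hc' : c ≠ -1 := by omega) <;>
    simp_all [List.filter_cons, List.filter_nil, PySem.List.min?_id_cons, List.foldl,
      Int.min_def] <;>
    first
    | rw [pv_min?_nil]
    | (split_ifs <;> omega)

theorem pvVal_eq (l : List Char) :
    pvFidxP l
      = (match PySem.List.min?
            (([PySem.Chars.find l ['.'], PySem.Chars.find l ['?'], PySem.Chars.find l ['!']]).filter
              (fun i => i != -1)) (fun x => x) with
         | some m => m
         | none => -1) := by
  rw [pvFind_singleton, pvFind_singleton, pvFind_singleton,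
    pvCombine _ _ _ (pvFidx_cases _ _) (pvFidx_cases _ _) (pvFidx_cases _ _)]
  induction l with
  | nil => simp [pvFidxP, pvFidx]
  | cons h t ih =>
      by_cases hc : h = '.' ∨ h = '?' ∨ h = '!'
      · rcases hc with h1 | h1 | h1 <;>
        · subst h1
          rcases pvFidx_cases '.' t with hd | hd <;>
          rcases pvFidx_cases '?' t with hq | hq <;>
          rcases pvFidx_cases '!' t with he | he <;>
            simp [pvFidxP, pvFidx, hd, hq, he] <;> split_ifs <;> omega
      · push_neg at hc
        rcases pvFidx_cases '.' t with hd | hd <;>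
        rcases pvFidx_cases '?' t with hq | hq <;>
        rcases pvFidx_cases '!' t with he | he <;>
          simp [pvFidxP, pvFidx, hc.1, hc.2.1, hc.2.2, hd, hq, he, ih] <;>
          split_ifs <;> omega

theorem pvPerString (s : String) :
    pvALoop (PySem.List.enumerate s.toList 0) = pvBVal s := by
  rw [pvALoop_enumerate]
  have h1 : pvBVal s
      = (match PySem.List.min?
            (([PySem.Chars.find s.toList ['.'], PySem.Chars.find s.toList ['?'],
               PySem.Chars.find s.toList ['!']]).filter (fun i => i != -1)) (fun x => x) with
         | some m => m
         | none => -1) := by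
    simp [pvBVal, PySem.Str.find_eq]
  rw [h1, ← pvVal_eq]
  rcases pvFidxP_cases s.toList with h | h
  · simp [h]
  · split_ifs with h2 <;> omega

theorem pvFold_congr (ss : List String) (d : PySem.Dict String Int) :
    ss.foldl (fun result string =>
        result.insert string (pvALoop (PySem.List.enumerate string.toList 0))) d
      = ss.foldl (fun result s => result.insert s (pvBVal s)) d := by
  induction ss generalizing d with
  | nil => rfl
  | cons h t ih => simp only [List.foldl_cons, pvPerString, ih]

-- ===== VERDICT (by name: the statement is the Claim_ definition above) =====
theorem firstPunctuationLocations_spec : Claim_equal_firstPunctuationLocations := by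
  intro strings _
  unfold Spec_firstPunctuationLocations firstPunctuationLocations firstPunctuationLocations_alt
  rw [pvFold_congr]
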